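-- pv_equiv track=rewrite | github.com/germanilia/bob_the_db_chatbot | backend/services/sql_generation_service.py | _is_semicolon_in_string
-- ===== SOURCE A (Python) =====
-- def _is_semicolon_in_string(query: str) -> bool:
--     """Check if semicolon appears only within string literals"""
--     in_string = False
--     for char in query:
--         if char == "'":
--             in_string = not in_string
--         elif char == ';' and not in_string:
--             return False
--     return True
-- ===== SOURCE B (Python) =====
-- def _is_semicolon_in_string(query: str) -> bool:
--     """Check if semicolon appears only within string literals"""
--     segments = query.split("'")
--     return all(';' not in seg for seg in segments[::2])
-- ===== Notes on version B (the rewrite author's own statement) =====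
-- stated objective: simpler
-- what changed: Replaces the stateful per-character scan with a quote-split followed by a semicolon-membership check on the even-indexed (outside-string-literal) segments; the per-character Python loop disappears into C-level str.split/in.
import Mathlib
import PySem

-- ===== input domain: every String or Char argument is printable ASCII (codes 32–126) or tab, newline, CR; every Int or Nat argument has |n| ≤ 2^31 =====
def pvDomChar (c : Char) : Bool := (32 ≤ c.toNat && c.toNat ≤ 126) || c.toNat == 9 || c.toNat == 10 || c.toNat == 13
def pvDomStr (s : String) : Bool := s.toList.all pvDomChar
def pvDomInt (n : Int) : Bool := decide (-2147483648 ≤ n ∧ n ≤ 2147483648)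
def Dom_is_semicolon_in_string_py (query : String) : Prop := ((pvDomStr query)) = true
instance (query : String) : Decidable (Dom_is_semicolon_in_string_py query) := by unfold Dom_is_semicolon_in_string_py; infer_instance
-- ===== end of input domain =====

-- B replaces A's stateful per-character scan by splitting on quotes and checking the
-- even-indexed (outside-string) segments for semicolons; objective: simpler.

-- ===== PORT A =====
-- literal port of A's for-loop with its in_string flag and early 'return False'
def is_semicolon_in_string_go (chars : List Char) (in_string : Bool) : Bool :=
  match chars with
  | [] => true
  | c :: rest =>
    if c = '\'' then is_semicolon_in_string_go rest (!in_string)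
    else if c = ';' && !in_string then false
    else is_semicolon_in_string_go rest in_string

def is_semicolon_in_string_py (query : String) : Bool :=
  is_semicolon_in_string_go query.toList false

-- ===== PORT B =====
-- segments = query.split("'"); all(';' not in seg for seg in segments[::2])
-- step literal 2 ≠ 0 so slice? is always some; .getD [] only discharges the Option
def is_semicolon_in_string_py_alt (query : String) : Bool :=
  let segments := PySem.Chars.splitOn query.toList ['\'']
  ((PySem.List.slice? segments none none 2).getD []).all
    (fun seg => !PySem.Chars.isIn [';'] seg)

-- ===== PRECONDITION & SPEC =====
def Spec_is_semicolon_in_string_py (query : String) (out : Bool) : Prop := out = is_semicolon_in_string_py_alt query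
instance (query : String) (out : Bool) : Decidable (Spec_is_semicolon_in_string_py query out) := by unfold Spec_is_semicolon_in_string_py; infer_instance

-- ===== CLAIM (what is proved, stated in full; the proofs are below) =====
def Claim_equal_is_semicolon_in_string_py : Prop := ∀ (query : String), Dom_is_semicolon_in_string_py query → Spec_is_semicolon_in_string_py query (is_semicolon_in_string_py query)

-- ===== LEMMAS AND PROOFS =====

-- even-indexed / odd-indexed elements (proof-side characterisation of xs[::2])
def pvEvens {α : Type} : List α → List α
  | [] => []
  | [x] => [x]
  | x :: _ :: r => x :: pvEvens r

def pvOdds {α : Type} : List α → List α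
  | [] => []
  | _ :: r => pvEvens r

theorem pvEvens_cons {α : Type} (x : α) (xs : List α) :
    pvEvens (x :: xs) = x :: pvOdds xs := by
  cases xs <;> simp [pvEvens, pvOdds]

-- xs[::2] picks exactly the elements at indices 2k
theorem pv_filterMap_range_evens {α : Type} :
    ∀ (xs : List α),
      (List.range ((xs.length + 1) / 2)).filterMap (fun k => xs[2 * k]?) = pvEvens xs
  | [] => by simp [pvEvens]
  | [x] => by simp [List.range_succ, pvEvens]
  | x :: y :: r => by
    have h : (x :: y :: r).length + 1 = r.length + 1 + 2 := by simp
    rw [h, show (r.length + 1 + 2) / 2 = (r.length + 1) / 2 + 1 by omega,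
        List.range_succ_eq_map]
    simp only [List.filterMap_cons, List.filterMap_map]
    have h2 : ∀ k : Nat, ((x :: y :: r)[2 * (k + 1)]? : Option α) = r[2 * k]? := by
      intro k
      rw [show 2 * (k + 1) = 2 * k + 1 + 1 by ring]
      simp
    simp only [Function.comp_def, h2, pv_filterMap_range_evens r]
    simp [pvEvens]

theorem pv_slice?_two {α : Type} (xs : List α) :
    PySem.List.slice? xs none none 2 = some (pvEvens xs) := by
  rw [PySem.List.slice?, PySem.List.sliceIndices]
  simp only [if_neg (by norm_num : ¬ (2:Int) < 0), if_neg (by norm_num : ¬ (2:Int) = 0),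
    if_pos (by norm_num : (0:Int) < 2)]
  have hcount : (if (0:Int) < ↑xs.length then (((xs.length:Int) - 0 + 2 - 1) / 2).toNat else 0)
      = (xs.length + 1) / 2 := by
    split_ifs with h
    · rw [show ((xs.length:Int) - 0 + 2 - 1) = ((xs.length + 1 : Nat) : Int) by push_cast; ring,
        show ((2:Int)) = ((2:Nat):Int) from rfl, ← Int.natCast_div, Int.toNat_natCast]
    · omega
  rw [hcount]
  congr 1
  rw [← pv_filterMap_range_evens xs]
  apply List.filterMap_congr
  intro k _
  congr 1
  omega

-- 'sub in s' for a one-character sub is membership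
theorem pv_isIn_singleton (a : Char) (l : List Char) :
    PySem.Chars.isIn [a] l = decide (a ∈ l) := by
  cases hb : PySem.Chars.isIn [a] l
  · have := (PySem.Chars.isIn_eq_false_iff _ _).mp hb
    rw [List.singleton_infix_iff] at this
    simp [this]
  · have := (PySem.Chars.isIn_iff_infix _ _).mp hb
    rw [List.singleton_infix_iff] at this
    simp [this]

-- A's scan agrees with the alternating-segment reading of splitOnP:
-- outside a string it checks the even-indexed segments, inside the odd-indexed rest
theorem pv_go_splitOnP :
    ∀ (s : List Char) (ins : Bool),
      is_semicolon_in_string_go s ins =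
        ((if ins then pvOdds (List.splitOnP (· == '\'') s)
          else pvEvens (List.splitOnP (· == '\'') s)).all
            (fun seg => !PySem.Chars.isIn [';'] seg)) := by
  intro s
  induction s with
  | nil =>
    intro ins
    cases ins <;> simp [is_semicolon_in_string_go, pvEvens, pvOdds, pv_isIn_singleton]
  | cons c rest ih =>
    intro ins
    rw [List.splitOnP_cons]
    by_cases hc : c = '\''
    · simp only [hc, is_semicolon_in_string_go, beq_self_eq_true, if_true, ih]
      cases ins
      · simp [pvEvens_cons, pv_isIn_singleton]
      · simp [pvOdds]
    · obtain ⟨x, xs, hx⟩ : ∃ x xs, List.splitOnP (· == '\'') rest = x :: xs := by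
        rcases hL : List.splitOnP (· == '\'') rest with _ | ⟨x, xs⟩
        · exact absurd hL (List.splitOnP_ne_nil _ _)
        · exact ⟨x, xs, rfl⟩
      simp only [is_semicolon_in_string_go, beq_iff_eq, if_neg hc, hx, List.modifyHead_cons]
      cases ins
      · by_cases hsemi : c = ';'
        · simp [hsemi, pvEvens_cons, pv_isIn_singleton]
        · rw [if_neg (by simp [hsemi]), ih]
          simp [pvEvens_cons, pv_isIn_singleton, hx,
            show ¬(';' = c) from fun h => hsemi h.symm]
      · rw [if_neg (by simp), ih]
        simp [pvOdds, hx]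

-- PySem's fuel-based split with a single-character separator is core's splitOnP
theorem pv_go_single (q : Char) :
    ∀ (fuel : Nat) (l cur : List Char) (acc : List (List Char)), l.length ≤ fuel →
      PySem.Chars.splitOn.go [q] fuel l cur acc =
        acc.reverse ++ (List.splitOnP (· == q) l).modifyHead (cur.reverse ++ ·) := by
  intro fuel
  induction fuel with
  | zero =>
    intro l cur acc h
    have : l = [] := by cases l <;> simp_all
    subst this
    simp [PySem.Chars.splitOn.go, List.splitOnP_nil]
  | succ f ihf =>
    intro l cur acc h
    cases l with
    | nil => simp [PySem.Chars.splitOn.go, List.splitOnP_nil]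
    | cons c rest =>
      rw [PySem.Chars.splitOn.go]
      by_cases hq : q = c
      · subst hq
        rw [if_pos (by simp [List.isPrefixOf])]
        rw [ihf _ _ _ (by simpa using h)]
        rw [List.splitOnP_cons, if_pos (by simp)]
        simp only [List.reverse_nil, List.nil_append]
        rw [List.reverse_cons, List.append_assoc]
        simp
        exact congrFun List.modifyHead_id _
      · rw [if_neg (by simp [List.isPrefixOf, hq])]
        rw [ihf _ _ _ (by simpa using h)]
        rw [List.splitOnP_cons, if_neg (by simp; exact fun h => hq h.symm)]
        obtain ⟨x, xs, hx⟩ : ∃ x xs, List.splitOnP (· == q) rest = x :: xs := by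
          rcases hL : List.splitOnP (· == q) rest with _ | ⟨x, xs⟩
          · exact absurd hL (List.splitOnP_ne_nil _ _)
          · exact ⟨x, xs, rfl⟩
        simp [hx]

theorem pv_splitOn_single (q : Char) (s : List Char) :
    PySem.Chars.splitOn s [q] = List.splitOnP (· == q) s := by
  rw [PySem.Chars.splitOn, pv_go_single q _ _ _ _ (by omega)]
  obtain ⟨x, xs, hx⟩ : ∃ x xs, List.splitOnP (· == q) s = x :: xs := by
    rcases hL : List.splitOnP (· == q) s with _ | ⟨x, xs⟩
    · exact absurd hL (List.splitOnP_ne_nil _ _)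
    · exact ⟨x, xs, rfl⟩
  simp [hx]

-- ===== VERDICT (by name: the statement is the Claim_ definition above) =====
theorem is_semicolon_in_string_py_spec : Claim_equal_is_semicolon_in_string_py := by
  intro query _
  unfold Spec_is_semicolon_in_string_py
  unfold is_semicolon_in_string_py is_semicolon_in_string_py_alt
  simp only [pv_splitOn_single, pv_slice?_two, Option.getD_some, pv_go_splitOnP, if_false,
    Bool.false_eq_true]
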